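-- pv_equiv track=rewrite | github.com/Santiagolainen/ejercicios-AED | Ficha12E1.py | pal_4_6_letras
-- ===== SOURCE A (Python) =====
-- def pal_4_6_letras(oracion):
--     palabra = ''
--     cont_pal_4_6 = 0
--     i = 0
--     while oracion[i] != '.':
--         if oracion[i] != ' ':
--             palabra += oracion[i]
--         else:
--             if 4 <= len(palabra) <= 6 and len(palabra) > 0:
--                 cont_pal_4_6 += 1
--             palabra = ''
--         i += 1
--     if 4 <= len(palabra) <= 6 and len(palabra) > 0:
--         cont_pal_4_6 += 1
--     return cont_pal_4_6
-- ===== SOURCE B (Python) =====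
-- def pal_4_6_letras(oracion):
--     i = 0
--     while oracion[i] != '.':
--         i += 1
--     return sum(1 for w in oracion[:i].split(' ') if 4 <= len(w) <= 6)
-- ===== Notes on version B (the rewrite author's own statement) =====
-- stated objective: simpler
-- what changed: B only scans for the first '.' with the index loop, then splits the prefix on ' ' and counts words of length 4-6 in one comprehension, instead of rebuilding each word character by character with an accumulator and a duplicated end-of-word check.
import Mathlib
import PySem

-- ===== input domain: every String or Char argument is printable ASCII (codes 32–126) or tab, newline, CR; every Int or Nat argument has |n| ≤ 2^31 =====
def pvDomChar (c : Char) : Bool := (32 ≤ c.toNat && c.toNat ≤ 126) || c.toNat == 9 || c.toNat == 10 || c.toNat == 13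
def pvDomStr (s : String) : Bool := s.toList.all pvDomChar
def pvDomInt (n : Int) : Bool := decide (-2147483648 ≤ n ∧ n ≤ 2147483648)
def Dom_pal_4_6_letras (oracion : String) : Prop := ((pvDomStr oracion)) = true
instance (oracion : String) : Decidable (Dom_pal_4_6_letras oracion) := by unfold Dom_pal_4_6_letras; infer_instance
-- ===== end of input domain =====

-- B scans for the first '.' and then splits the prefix on ' ' and counts words of
-- length 4..6, instead of A's char-by-char word accumulator (objective: simpler).

-- ===== PORT A =====
-- A's while loop over oracion[i] until '.', carrying palabra and the counter.
def pvALoop : List Char → List Char → Int → Int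
  | [], _, cont => cont  -- unreachable under Pre_ (Python raises IndexError here)
  | c :: rest, palabra, cont =>
    if c ≠ '.' then
      if c ≠ ' ' then pvALoop rest (palabra ++ [c]) cont
      else pvALoop rest []
        (cont + (if (4 ≤ palabra.length ∧ palabra.length ≤ 6) ∧ 0 < palabra.length then 1 else 0))
    else cont + (if (4 ≤ palabra.length ∧ palabra.length ≤ 6) ∧ 0 < palabra.length then 1 else 0)

def pal_4_6_letras (oracion : String) : Int := pvALoop oracion.toList [] 0

-- ===== PORT B =====
-- B's while loop advancing i until '.': the chars before the first '.' (oracion[:i]).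
def pvPrefixUntilDot : List Char → List Char
  | [] => []  -- unreachable under Pre_ (Python raises IndexError here)
  | c :: rest => if c ≠ '.' then c :: pvPrefixUntilDot rest else []

def pal_4_6_letras_alt (oracion : String) : Int :=
  (PySem.Chars.splitOn (pvPrefixUntilDot oracion.toList) [' ']).foldl
    (fun acc w => acc + (if 4 ≤ w.length ∧ w.length ≤ 6 then 1 else 0)) 0

-- ===== PRECONDITION & SPEC =====
-- Pre_ excludes exactly the inputs with no '.', on which Python A raises IndexError.
def Pre_pal_4_6_letras (oracion : String) : Prop := '.' ∈ oracion.toList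
instance (oracion : String) : Decidable (Pre_pal_4_6_letras oracion) := by
  unfold Pre_pal_4_6_letras; infer_instance

def pvWitness_pal_4_6_letras : String := "hola casa."

def Spec_pal_4_6_letras (oracion : String) (out : Int) : Prop := out = pal_4_6_letras_alt oracion
instance (oracion : String) (out : Int) : Decidable (Spec_pal_4_6_letras oracion out) := by
  unfold Spec_pal_4_6_letras; infer_instance

-- ===== CLAIM (what is proved, stated in full; the proofs are below) =====
def Claim_equal_pal_4_6_letras : Prop := ∀ (oracion : String), Dom_pal_4_6_letras oracion → Pre_pal_4_6_letras oracion → Spec_pal_4_6_letras oracion (pal_4_6_letras oracion)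

-- ===== LEMMAS AND PROOFS =====

-- Reference split on a single space, with the current chunk accumulated reversed
-- (the same shape as PySem.Chars.splitOn.go).
def pvSplitSp : List Char → List Char → List (List Char)
  | cur, [] => [cur.reverse]
  | cur, c :: rest => if c = ' ' then cur.reverse :: pvSplitSp [] rest else pvSplitSp (c :: cur) rest

def pvCount (ws : List (List Char)) : Int :=
  ws.foldl (fun acc w => acc + (if 4 ≤ w.length ∧ w.length ≤ 6 then 1 else 0)) 0

theorem pvCount_shift (f : Int → List Char → Int)
    (hf : ∀ a w, f a w = a + f 0 w) :
    ∀ (l : List (List Char)) (a : Int), l.foldl f a = a + l.foldl f 0 := by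
  intro l
  induction l with
  | nil => intro a; simp
  | cons w t ih =>
    intro a
    simp only [List.foldl_cons]
    rw [ih (f a w), ih (f 0 w), hf a w]
    ring

theorem pvCount_cons (w : List Char) (t : List (List Char)) :
    pvCount (w :: t) = (if 4 ≤ w.length ∧ w.length ≤ 6 then 1 else 0) + pvCount t := by
  unfold pvCount
  simp only [List.foldl_cons]
  rw [pvCount_shift _ (by intro a w'; simp) t]
  simp

theorem pvIf_eq (w : List Char) :
    (if (4 ≤ w.length ∧ w.length ≤ 6) ∧ 0 < w.length then (1 : Int) else 0)
      = (if 4 ≤ w.length ∧ w.length ≤ 6 then 1 else 0) := by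
  split_ifs <;> omega

theorem pvGo_sp : ∀ (fuel : Nat) (l cur : List Char) (acc : List (List Char)),
    l.length < fuel →
    PySem.Chars.splitOn.go [' '] fuel l cur acc = acc.reverse ++ pvSplitSp cur l := by
  intro fuel
  induction fuel with
  | zero => intro l cur acc h; omega
  | succ n ih =>
    intro l cur acc h
    cases l with
    | nil => simp [PySem.Chars.splitOn.go, pvSplitSp]
    | cons c rest =>
      simp only [PySem.Chars.splitOn.go]
      by_cases hc : c = ' '
      · subst hc
        have hp : List.isPrefixOf [' '] (' ' :: rest) = true := by
          simp [List.isPrefixOf]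
        rw [hp]
        simp only [if_true]
        rw [ih _ _ _ (by simpa using Nat.lt_of_succ_lt_succ h)]
        simp [pvSplitSp]
      · have hp : List.isPrefixOf [' '] (c :: rest) = false := by
          simp [List.isPrefixOf]; exact fun hh => hc hh.symm
        rw [hp]
        simp only [Bool.false_eq_true, if_false]
        rw [ih _ _ _ (by simpa using Nat.lt_of_succ_lt_succ h)]
        simp [pvSplitSp, hc]

theorem pvSplitOn_sp (p : List Char) :
    PySem.Chars.splitOn p [' '] = pvSplitSp [] p := by
  unfold PySem.Chars.splitOn
  rw [pvGo_sp _ _ _ _ (by omega)]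
  simp

theorem pvPrefix_eq : ∀ (p rest : List Char), '.' ∉ p →
    pvPrefixUntilDot (p ++ '.' :: rest) = p := by
  intro p
  induction p with
  | nil => intro rest _; simp [pvPrefixUntilDot]
  | cons c t ih =>
    intro rest h
    have hc : c ≠ '.' := fun hh => h (hh ▸ List.mem_cons_self ..)
    simp only [List.cons_append, pvPrefixUntilDot, if_pos hc]
    rw [ih rest (fun hm => h (List.mem_cons_of_mem _ hm))]

theorem pvALoop_eq : ∀ (p : List Char) (rest palabra : List Char) (cont : Int), '.' ∉ p →
    pvALoop (p ++ '.' :: rest) palabra cont = cont + pvCount (pvSplitSp palabra.reverse p) := by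
  intro p
  induction p with
  | nil =>
    intro rest palabra cont _
    simp [pvALoop, pvSplitSp, pvCount, pvIf_eq palabra]
  | cons c t ih =>
    intro rest palabra cont h
    have hc : c ≠ '.' := fun hh => h (hh ▸ List.mem_cons_self ..)
    have ht : '.' ∉ t := fun hm => h (List.mem_cons_of_mem _ hm)
    simp only [List.cons_append, pvALoop, if_pos hc]
    by_cases hs : c = ' '
    · subst hs
      simp only [if_neg (by simp : ¬(' ' ≠ ' '))]
      rw [ih rest [] _ ht]
      simp only [pvSplitSp, if_true, List.reverse_nil, List.reverse_reverse]
      rw [pvCount_cons, pvIf_eq palabra]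
      ring
    · simp only [if_pos hs]
      rw [ih rest (palabra ++ [c]) cont ht]
      simp [pvSplitSp, hs, List.reverse_append]

theorem pvSplit_mem : ∀ (l : List Char), '.' ∈ l →
    ∃ p rest, l = p ++ '.' :: rest ∧ '.' ∉ p := by
  intro l
  induction l with
  | nil => intro h; simp at h
  | cons c t ih =>
    intro h
    by_cases hc : c = '.'
    · exact ⟨[], t, by simp [hc], by simp⟩
    · have ht : '.' ∈ t := by
        rcases List.mem_cons.mp h with h1 | h1
        · exact absurd h1.symm hc
        · exact h1
      obtain ⟨p, rest, hp, hnp⟩ := ih ht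
      exact ⟨c :: p, rest, by simp [hp], by
        intro hm
        rcases List.mem_cons.mp hm with h1 | h1
        · exact hc h1.symm
        · exact hnp h1⟩

-- ===== VERDICT (by name: the statement is the Claim_ definition above) =====
theorem pal_4_6_letras_spec : Claim_equal_pal_4_6_letras := by
  intro oracion _ hpre
  unfold Spec_pal_4_6_letras pal_4_6_letras pal_4_6_letras_alt
  obtain ⟨p, rest, hp, hnp⟩ := pvSplit_mem oracion.toList hpre
  rw [hp, pvALoop_eq p rest [] 0 hnp, pvPrefix_eq p rest hnp, pvSplitOn_sp]
  simp [pvCount]
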